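-- pv_equiv track=rewrite | github.com/Significant-Gravitas/AutoGPT | venv/Lib/site-packages/pythonwin/pywin/scintilla/IDLEenvironment.py | _NextTok
-- ===== SOURCE A (Python) =====
-- import string
--
-- def _NextTok(str, pos):
--     # Returns (token, endPos)
--     end = len(str)
--     if pos >= end:
--         return None, 0
--     while pos < end and str[pos] in string.whitespace:
--         pos = pos + 1
--     # Special case for +-
--     if str[pos] in "+-":
--         return str[pos], pos + 1
--     # Digits also a special case.
--     endPos = pos
--     while endPos < end and str[endPos] in string.digits + ".":
--         endPos = endPos + 1
--     if pos != endPos: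
--         return str[pos:endPos], endPos
--     endPos = pos
--     while endPos < end and str[endPos] not in string.whitespace + string.digits + "+-":
--         endPos = endPos + 1
--     if pos != endPos:
--         return str[pos:endPos], endPos
--     return None, 0
-- ===== SOURCE B (Python) =====
-- import string
--
-- def _NextTok(str, pos):
--     # Returns (token, endPos) -- a single left-to-right pass: a 3-state DFA
--     # (skipping-whitespace / inside-number / inside-word) accumulates the token
--     # character by character instead of staged boundary scans.
--     n = len(str)
--     if pos >= n:
--         return None, 0
--     state = 0            # 0 = skipping whitespace, 1 = in number, 2 = in word
--     tok = []
--     i = pos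
--     while i < n:
--         c = str[i]
--         if state == 0:
--             if c in string.whitespace:
--                 i += 1
--                 continue
--             if c in '+-':
--                 return c, i + 1
--             state = 1 if (c in string.digits or c == '.') else 2
--             tok.append(c)
--             i += 1
--         elif state == 1:
--             if c in string.digits or c == '.':
--                 tok.append(c)
--                 i += 1
--             else:
--                 break
--         else:
--             if c in string.whitespace or c in string.digits or c in '+-':
--                 break
--             tok.append(c)
--             i += 1
--     if tok:
--         return ''.join(tok), i
--     return None, 0
-- ===== Notes on version B (the rewrite author's own statement) =====
-- stated objective: alternative
-- what changed: B replaces A's staged boundary scans (whitespace-skip loop, then a digit-run scan, then a word-run scan, then slicing) with a single left-to-right pass: a 3-state DFA (skipping-whitespace / in-number / in-word) that accumulates the token character by character and never slices.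
-- outside the precondition, e.g. on _NextTok('ab', -1): A returns ('b', 2), B returns ('bab', 2); on _NextTok('a b', -3): A returns ('a', -2), B returns ('a', -2)
import Mathlib
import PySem

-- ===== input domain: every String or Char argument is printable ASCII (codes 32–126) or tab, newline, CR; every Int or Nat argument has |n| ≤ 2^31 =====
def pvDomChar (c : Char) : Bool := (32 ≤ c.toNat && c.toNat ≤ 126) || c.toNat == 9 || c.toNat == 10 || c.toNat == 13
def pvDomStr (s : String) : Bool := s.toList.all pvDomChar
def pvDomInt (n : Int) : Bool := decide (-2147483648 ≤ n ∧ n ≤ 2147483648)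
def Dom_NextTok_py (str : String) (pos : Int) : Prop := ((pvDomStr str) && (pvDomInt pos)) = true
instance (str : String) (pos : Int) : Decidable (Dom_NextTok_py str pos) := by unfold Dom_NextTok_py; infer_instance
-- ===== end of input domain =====

-- B replaces A's staged boundary scans with a single one-pass 3-state DFA that accumulates
-- the token (alternative decomposition, same cost); equal return value on Pre_.

-- character classes used by both Pythons ('string.whitespace', 'string.digits + "."', the word complement)
def pvIsWs (c : Char) : Bool := c = ' ' || c = '\t' || c = '\n' || c = '\x0b' || c = '\x0c' || c = '\r'
def pvIsNum (c : Char) : Bool := ('0' ≤ c && c ≤ '9') || c = '.'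
def pvIsWord (c : Char) : Bool := !(pvIsWs c || ('0' ≤ c && c ≤ '9') || c = '+' || c = '-')

-- ===== PORT A =====
-- 'while p < end and pred(str[p]): p += 1' — the index loop of A's three scans; fuel-structured
-- so the kernel can evaluate it (the fuel runs out only when p ≥ len, where the condition is false)
def pvScanAux (P : Char → Bool) (cs : List Char) (endI : Int) : Nat → Int → Int
  | 0, p => p
  | n + 1, p =>
    if p < endI ∧ (PySem.List.pyGet? cs p).any P then pvScanAux P cs endI n (p + 1)
    else p

-- 'end = len(str)' is computed once in Python; the loop receives it
def pvScan (P : Char → Bool) (cs : List Char) (p : Int) : Int :=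
  pvScanAux P cs (cs.length : Int) ((cs.length : Int) - p).toNat p

def NextTok_py (str : String) (pos : Int) : Option String × Int :=
  let cs := str.toList
  if (cs.length : Int) ≤ pos then (none, 0)
  else
    let p := pvScan pvIsWs cs pos
    match PySem.List.pyGet? cs p with
    | none => (none, 0)      -- Python raises IndexError at 'str[pos]' here; excluded by Pre_
    | some c =>
      if c = '+' || c = '-' then (some (String.ofList [c]), p + 1)
      else
        let e := pvScan pvIsNum cs p
        if p ≠ e then (some (String.ofList (PySem.List.slice cs (some p) (some e))), e)
        else
          let e2 := pvScan pvIsWord cs p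
          if p ≠ e2 then (some (String.ofList (PySem.List.slice cs (some p) (some e2))), e2)
          else (none, 0)

-- ===== PORT B =====
-- B's single 'while i < n' loop: state 0 skips whitespace, a '+-' returns immediately,
-- state 1/2 accumulate a number/word token; break or loop exit returns the accumulator.
-- Fuel-structured like pvScan; 'str[i]' is pyGet?; none = Python IndexError (outside Pre_).
def pvDfaExit (tok : List Char) (i : Int) : Option String × Int :=
  if tok ≠ [] then (some (String.ofList tok), i) else (none, 0)

def pvDfa (cs : List Char) (n : Int) : Nat → Int → Nat → List Char → Option String × Int
  | 0, i, _, tok => pvDfaExit tok i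
  | f + 1, i, state, tok =>
    if i < n then
      match PySem.List.pyGet? cs i with
      | none => (none, 0)      -- Python raises IndexError here; excluded by Pre_
      | some c =>
        if state = 0 then
          if pvIsWs c then pvDfa cs n f (i + 1) 0 tok
          else if c = '+' || c = '-' then (some (String.ofList [c]), i + 1)
          else pvDfa cs n f (i + 1) (if pvIsNum c then 1 else 2) (tok ++ [c])
        else if state = 1 then
          if pvIsNum c then pvDfa cs n f (i + 1) 1 (tok ++ [c])
          else pvDfaExit tok i
        else
          if pvIsWord c then pvDfa cs n f (i + 1) 2 (tok ++ [c])
          else pvDfaExit tok i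
    else pvDfaExit tok i

def NextTok_py_alt (str : String) (pos : Int) : Option String × Int :=
  let cs := str.toList
  let n : Int := cs.length
  if n ≤ pos then (none, 0)
  else pvDfa cs n (n - pos).toNat pos 0 []

-- ===== PRECONDITION & SPEC =====
-- Pre_ excludes negative pos — outside the tokenizer's natural domain, where A's result follows
-- Python's negative-index wraparound (B scans forward without wrapping) — and in-range pos whose
-- tail is all whitespace, where A raises IndexError at 'str[pos]'.
def Pre_NextTok_py (str : String) (pos : Int) : Prop :=
  (str.toList.length : Int) ≤ pos ∨
    (0 ≤ pos ∧ (str.toList.drop pos.toNat).any (fun c => !pvIsWs c) = true)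
instance (str : String) (pos : Int) : Decidable (Pre_NextTok_py str pos) := by
  unfold Pre_NextTok_py; infer_instance

def pvWitness_NextTok_py : String × Int := (" 7.5x", 0)

def Spec_NextTok_py (str : String) (pos : Int) (out : Option String × Int) : Prop := out = NextTok_py_alt str pos
instance (str : String) (pos : Int) (out : Option String × Int) : Decidable (Spec_NextTok_py str pos out) := by unfold Spec_NextTok_py; infer_instance

-- ===== CLAIM (what is proved, stated in full; the proofs are below) =====
def Claim_equal_NextTok_py : Prop := ∀ (str : String) (pos : Int), Dom_NextTok_py str pos → Pre_NextTok_py str pos → Spec_NextTok_py str pos (NextTok_py str pos)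


-- ===== LEMMAS AND PROOFS =====

-- the fuel recursion satisfies the loop's step equation
lemma pvScan_step (P : Char → Bool) (cs : List Char) (p : Int) :
    pvScan P cs p =
      if p < (cs.length : Int) ∧ (PySem.List.pyGet? cs p).any P then pvScan P cs (p + 1)
      else p := by
  unfold pvScan
  by_cases hc : p < (cs.length : Int) ∧ (PySem.List.pyGet? cs p).any P
  · have hn : ((cs.length : Int) - p).toNat = ((cs.length : Int) - (p + 1)).toNat + 1 := by
      have := hc.1; omega
    rw [hn, if_pos hc]
    simp [pvScanAux, hc]
  · rw [if_neg hc]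
    cases hn : ((cs.length : Int) - p).toNat with
    | zero => simp [pvScanAux]
    | succ k => simp [pvScanAux, hc]

-- the index loop computes p plus the length of the longest P-prefix of the suffix at p
lemma pvScan_aux (P : Char → Bool) (cs : List Char) (d : List Char) :
    ∀ p : Int, 0 ≤ p → cs.drop p.toNat = d →
      pvScan P cs p = p + ((d.takeWhile P).length : Int) := by
  induction d with
  | nil =>
      intro p hp hd
      have hlen : (cs.length : Int) ≤ p := by
        have := List.drop_eq_nil_iff.mp hd
        omega
      rw [pvScan_step, if_neg]
      · simp
      · rintro ⟨h1, _⟩; omega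
  | cons c d' ih =>
      intro p hp hd
      have hlt : p.toNat < cs.length := by
        by_contra h
        rw [List.drop_eq_nil_iff.mpr (by omega)] at hd
        simp at hd
      have hget : PySem.List.pyGet? cs p = some c := by
        rw [PySem.List.pyGet?_of_nonneg cs hp]
        have : cs[p.toNat]? = (cs.drop p.toNat)[0]? := by
          simp [List.getElem?_drop]
        rw [this, hd]; rfl
      by_cases hPc : P c = true
      · rw [pvScan_step, if_pos ⟨by omega, by rw [hget]; simpa using hPc⟩]
        have hd' : cs.drop (p + 1).toNat = d' := by
          have h1 : (p + 1).toNat = p.toNat + 1 := by omega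
          rw [h1, ← List.drop_drop, hd]
          rfl
        rw [ih (p + 1) (by omega) hd']
        rw [List.takeWhile_cons_of_pos hPc]
        simp; omega
      · rw [pvScan_step, if_neg]
        · rw [List.takeWhile_cons_of_neg (by simpa using hPc)]
          simp
        · rintro ⟨_, h2⟩
          rw [hget] at h2
          simp at h2
          exact hPc h2

lemma pvScan_eq (P : Char → Bool) (cs : List Char) (p : Int) (hp : 0 ≤ p) :
    pvScan P cs p = p + (((cs.drop p.toNat).takeWhile P).length : Int) :=
  pvScan_aux P cs (cs.drop p.toNat) p hp rfl

lemma pvScan_nonneg (P : Char → Bool) (cs : List Char) (p : Int) (hp : 0 ≤ p) :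
    0 ≤ pvScan P cs p := by
  rw [pvScan_eq P cs p hp]; positivity

-- A's scanned slice is exactly the takeWhile prefix of the suffix
lemma pvSlice_scan (P : Char → Bool) (cs : List Char) (p : Int) (hp : 0 ≤ p) :
    PySem.List.slice cs (some p) (some (pvScan P cs p))
      = (cs.drop p.toNat).takeWhile P := by
  rw [pvScan_eq P cs p hp]
  rw [PySem.List.slice_toNat cs hp (by positivity)]
  have hk : (p + (((cs.drop p.toNat).takeWhile P).length : Int)).toNat - p.toNat
      = ((cs.drop p.toNat).takeWhile P).length := by omega
  rw [hk]
  exact (List.prefix_iff_eq_take.mp (List.takeWhile_prefix P)).symm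

-- getting the head of the suffix at a nonnegative in-range index
lemma pvGet_drop (cs : List Char) (i : Int) (hi : 0 ≤ i) (c : Char) (d : List Char)
    (hd : cs.drop i.toNat = c :: d) : PySem.List.pyGet? cs i = some c := by
  have hlt : i.toNat < cs.length := by
    by_contra h
    rw [List.drop_eq_nil_iff.mpr (by omega)] at hd
    simp at hd
  rw [PySem.List.pyGet?_of_nonneg cs hi]
  have : cs[i.toNat]? = (cs.drop i.toNat)[0]? := by simp [List.getElem?_drop]
  rw [this, hd]; rfl

-- B's token states: with enough fuel, state s ∈ {1,2} accumulates the P-run of the suffix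
-- (P = pvIsNum for s=1, pvIsWord for s=2) and exits with tok ++ run
lemma pvDfa_run (P : Char → Bool) (s : Nat) (hs : s = 1 ∨ s = 2)
    (hP : ∀ c, (if s = 1 then pvIsNum c else pvIsWord c) = P c)
    (cs : List Char) (d : List Char) :
    ∀ (f : Nat) (i : Int) (tok : List Char), 0 ≤ i → cs.drop i.toNat = d →
      (cs.length : Int) - i ≤ (f : Int) →
      pvDfa cs (cs.length : Int) f i s tok
        = pvDfaExit (tok ++ d.takeWhile P) (i + ((d.takeWhile P).length : Int)) := by
  induction d with
  | nil =>
      intro f i tok hi hd hf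
      have hlen : (cs.length : Int) ≤ i := by
        have := List.drop_eq_nil_iff.mp hd; omega
      cases f with
      | zero => simp [pvDfa]
      | succ f' =>
          rw [pvDfa, if_neg (by omega)]
          simp
  | cons c d' ih =>
      intro f i tok hi hd hf
      have hlt : i.toNat < cs.length := by
        by_contra h
        rw [List.drop_eq_nil_iff.mpr (by omega)] at hd
        simp at hd
      have hget := pvGet_drop cs i hi c d' hd
      cases f with
      | zero => omega
      | succ f' =>
          have hd' : cs.drop (i + 1).toNat = d' := by
            have h1 : (i + 1).toNat = i.toNat + 1 := by omega
            rw [h1, ← List.drop_drop, hd]; rfl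
          rw [pvDfa, if_pos (by omega), hget]
          rcases hs with h1 | h2
          · subst h1
            have hPc : pvIsNum c = P c := by simpa using hP c
            dsimp only
            try simp only [reduceIte]
            by_cases hc : P c = true
            · rw [hPc, hc, if_pos rfl]
              rw [ih f' (i + 1) (tok ++ [c]) (by omega) hd' (by push_cast; omega)]
              rw [List.takeWhile_cons_of_pos hc,
                  show tok ++ c :: List.takeWhile P d' = (tok ++ [c]) ++ List.takeWhile P d' from by simp,
                  show i + ((c :: List.takeWhile P d').length : Int) = i + 1 + ((List.takeWhile P d').length : Int) from by push_cast [List.length_cons]; ring]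
              simp
            · rw [hPc, if_neg hc]
              rw [List.takeWhile_cons_of_neg (by simpa using hc)]
              simp [pvDfaExit]
              try exact fun h => absurd h hc
          · subst h2
            have hPc : pvIsWord c = P c := by simpa using hP c
            dsimp only
            try simp only [reduceIte]
            by_cases hc : P c = true
            · rw [hPc, hc, if_pos rfl]
              rw [ih f' (i + 1) (tok ++ [c]) (by omega) hd' (by push_cast; omega)]
              rw [List.takeWhile_cons_of_pos hc,
                  show tok ++ c :: List.takeWhile P d' = (tok ++ [c]) ++ List.takeWhile P d' from by simp,
                  show i + ((c :: List.takeWhile P d').length : Int) = i + 1 + ((List.takeWhile P d').length : Int) from by push_cast [List.length_cons]; ring]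
              simp
            · rw [hPc, if_neg hc]
              rw [List.takeWhile_cons_of_neg (by simpa using hc)]
              simp [pvDfaExit]
              try exact fun h => absurd h hc

-- B's state 0 with an empty accumulator: skip the whitespace prefix, then dispatch
lemma pvDfa_ws (cs : List Char) (d : List Char) :
    ∀ (f : Nat) (i : Int), 0 ≤ i → cs.drop i.toNat = d →
      (cs.length : Int) - i ≤ (f : Int) →
      pvDfa cs (cs.length : Int) f i 0 []
        = match d.dropWhile pvIsWs with
          | [] => (none, 0)
          | c :: _ =>
            let p := i + ((d.takeWhile pvIsWs).length : Int)
            if c = '+' || c = '-' then (some (String.ofList [c]), p + 1)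
            else pvDfa cs (cs.length : Int) (f - (d.takeWhile pvIsWs).length - 1) (p + 1)
                   (if pvIsNum c then 1 else 2) [c] := by
  induction d with
  | nil =>
      intro f i hi hd hf
      have hlen : (cs.length : Int) ≤ i := by
        have := List.drop_eq_nil_iff.mp hd; omega
      cases f with
      | zero => simp [pvDfa, pvDfaExit]
      | succ f' =>
          rw [pvDfa, if_neg (by omega)]
          simp [pvDfaExit]
  | cons c d' ih =>
      intro f i hi hd hf
      have hlt : i.toNat < cs.length := by
        by_contra h
        rw [List.drop_eq_nil_iff.mpr (by omega)] at hd
        simp at hd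
      have hget := pvGet_drop cs i hi c d' hd
      have hd' : cs.drop (i + 1).toNat = d' := by
        have h1 : (i + 1).toNat = i.toNat + 1 := by omega
        rw [h1, ← List.drop_drop, hd]; rfl
      cases f with
      | zero => omega
      | succ f' =>
          rw [pvDfa, if_pos (by omega), hget]
          dsimp only
          by_cases hws : pvIsWs c = true
          · rw [if_pos hws]
            rw [ih f' (i + 1) (by omega) hd' (by push_cast; omega)]
            rw [List.dropWhile_cons_of_pos hws, List.takeWhile_cons_of_pos hws]
            cases hrest : d'.dropWhile pvIsWs with
            | nil => rfl
            | cons c2 r2 =>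
                simp only []
                have harith : i + 1 + ((d'.takeWhile pvIsWs).length : Int)
                    = i + (((d'.takeWhile pvIsWs).length + 1 : Nat) : Int) := by
                  push_cast; omega
                have hfuel : f' - (d'.takeWhile pvIsWs).length - 1
                    = f' + 1 - ((d'.takeWhile pvIsWs).length + 1) - 1 := by omega
                rw [harith, hfuel]
                simp [List.length_cons]
          · rw [if_neg hws]
            rw [List.dropWhile_cons_of_neg (by simpa using hws),
                List.takeWhile_cons_of_neg (by simpa using hws)]
            by_cases hpm : (c = '+' || c = '-') = true
            · simp [hpm]
            · simp only [hpm, Bool.false_eq_true, if_false]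
              simp only [List.length_nil, Nat.cast_zero, add_zero]
              congr 1
              try omega

-- the head of a nonempty dropWhile fails the predicate
lemma pvDropWhile_head_neg (c : Char) (r : List Char) :
    ∀ d : List Char, d.dropWhile pvIsWs = c :: r → pvIsWs c = false := by
  intro d
  induction d with
  | nil => intro h; simp at h
  | cons a d' ih =>
      intro h
      by_cases ha : pvIsWs a = true
      · rw [List.dropWhile_cons_of_pos ha] at h
        exact ih h
      · rw [List.dropWhile_cons_of_neg (by simpa using ha)] at h
        cases h
        simpa using ha

-- the whitespace-prefix length and the non-whitespace head, shared by both sides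
lemma pvDropWhile_head (c : Char) (r : List Char) :
    ∀ d : List Char, d.dropWhile pvIsWs = c :: r →
      d.drop (d.takeWhile pvIsWs).length = c :: r := by
  intro d
  induction d with
  | nil => intro h; simp at h
  | cons a d' ih =>
      intro h
      by_cases ha : pvIsWs a = true
      · rw [List.dropWhile_cons_of_pos ha] at h
        rw [List.takeWhile_cons_of_pos ha]
        simpa using ih h
      · rw [List.dropWhile_cons_of_neg (by simpa using ha)] at h
        rw [List.takeWhile_cons_of_neg (by simpa using ha)]
        simpa using h

-- ===== VERDICT (by name: the statement is the Claim_ definition above) =====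
theorem NextTok_py_spec : Claim_equal_NextTok_py := by
  intro str pos hdom hpre
  unfold Spec_NextTok_py NextTok_py NextTok_py_alt
  by_cases hend : (str.toList.length : Int) ≤ pos
  · simp only [if_pos hend]
  · simp only [if_neg hend]
    have hpos : 0 ≤ pos := by
      rcases hpre with h | ⟨h, _⟩
      · exact absurd h hend
      · exact h
    set cs := str.toList with hcs
    set d := cs.drop pos.toNat with hdd
    -- B side: run the whitespace lemma
    rw [pvDfa_ws cs d ((cs.length : Int) - pos).toNat pos hpos hdd.symm (by omega)]
    -- A side: the whitespace scan
    have hwsA := pvScan_eq pvIsWs cs pos hpos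
    set p := pvScan pvIsWs cs pos with hp
    have hp0 : 0 ≤ p := pvScan_nonneg _ _ _ hpos
    have hpval : p = pos + ((d.takeWhile pvIsWs).length : Int) := by
      rw [hdd]; exact hwsA
    cases hrest : d.dropWhile pvIsWs with
    | nil =>
        -- excluded by Pre_: tail all whitespace
        exfalso
        rcases hpre with h | ⟨_, hany⟩
        · exact hend h
        · rw [← hdd] at hany
          have : d.dropWhile pvIsWs ≠ [] := by
            simp only [ne_eq, List.dropWhile_eq_nil_iff]
            push_neg
            rcases List.any_eq_true.mp hany with ⟨c, hc, hcw⟩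
            exact ⟨c, hc, by simpa using hcw⟩
          exact this hrest
    | cons c r =>
        have hdropP : cs.drop p.toNat = c :: r := by
          have h1 : p.toNat = pos.toNat + (d.takeWhile pvIsWs).length := by omega
          rw [h1, ← List.drop_drop, ← hdd]
          exact pvDropWhile_head c r d hrest
        have hget : PySem.List.pyGet? cs p = some c := pvGet_drop cs p hp0 c r hdropP
        rw [hget]
        rw [← hpval]
        by_cases hpm : (c = '+' || c = '-') = true
        · simp only [hpm, if_pos]
        · simp only [hpm, Bool.false_eq_true, if_false]
          have hdropP1 : cs.drop (p + 1).toNat = r := by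
            have h1 : (p + 1).toNat = p.toNat + 1 := by omega
            rw [h1, ← List.drop_drop, hdropP]; rfl
          have hnum := pvScan_eq pvIsNum cs p hp0
          have hword := pvScan_eq pvIsWord cs p hp0
          have hsn := pvSlice_scan pvIsNum cs p hp0
          have hsw := pvSlice_scan pvIsWord cs p hp0
          rw [hdropP] at hnum hword hsn hsw
          by_cases hcn : pvIsNum c = true
          · -- number token on both sides
            rw [List.takeWhile_cons_of_pos hcn] at hnum hsn
            rw [if_pos (by rw [hnum]; simp; omega)]
            rw [if_pos hcn]
            rw [pvDfa_run pvIsNum 1 (Or.inl rfl) (fun c => by simp) cs r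
                  _ (p + 1) [c] (by omega) hdropP1 (by omega)]
            rw [hsn, hnum]
            simp [pvDfaExit, Prod.ext_iff, List.length_cons]
            push_cast
            ring
          · -- word token on both sides (c is not ws, not sign, not num ⇒ word)
            have hcw : pvIsWord c = true := by
              have h1 : pvIsWs c = false := pvDropWhile_head_neg c r d hrest
              unfold pvIsWord
              unfold pvIsNum at hcn
              simp only [Bool.or_eq_true, decide_eq_true_eq, Bool.and_eq_true] at hcn hpm ⊢
              push_neg at hcn hpm
              simp [h1, hcn, hpm.1, hpm.2]
              by_cases h0 : '0' ≤ c
              · exact Or.inr (hcn.1 h0)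
              · exact Or.inl (lt_of_not_ge h0)
            rw [List.takeWhile_cons_of_neg (by simpa using hcn)] at hnum hsn
            rw [List.takeWhile_cons_of_pos hcw] at hword hsw
            rw [if_neg (by rw [hnum]; simp)]
            rw [if_pos (by rw [hword]; simp; omega)]
            rw [if_neg hcn]
            rw [pvDfa_run pvIsWord 2 (Or.inr rfl) (fun c => by simp) cs r
                  _ (p + 1) [c] (by omega) hdropP1 (by omega)]
            rw [hsw, hword]
            simp [pvDfaExit, Prod.ext_iff, List.length_cons]
            push_cast
            ring
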